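-- pv_equiv track=rewrite | github.com/hyun-young/algorithm_study_hy | step-by-step/kakao/lv1 신규 아이디 추천.py | solution
-- ===== SOURCE A (Python) =====
-- def solution(new_id):
--     new_id = new_id.lower() # 1
--     able = ['-','_']
--     temp = []
--     dot = 0
--     for i in new_id: # 2
--         if i.isdigit() or i.isalpha() or i in able:
--             temp.append(i)
--             dot = 0
--         elif i == '.': # 3
--             if dot==0:
--                 temp.append(i)
--             dot += 1
--
--     # 4
--     try:
--         if temp[0] == '.': temp.pop(0)
--         if temp[-1] =='.': temp.pop()
--     except:
--         return 'aaa'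
--     # 5
--     if len(temp) == 0:
--         return 'aaa' # 바로 반환
--     # 6
--     if len(temp) >= 16:
--         temp = temp[0:15]
--         if temp[-1] == '.': temp.pop()
--     # 7
--     if len(temp) <= 2:
--         for _ in range(3-len(temp)):
--             temp.append(temp[-1])
--
--     return ''.join(temp)
-- ===== SOURCE B (Python) =====
-- def solution(new_id):
--     s = new_id.lower()
--     s = ''.join(c for c in s if c.isdigit() or c.isalpha() or c in ('-', '_', '.'))
--     s = ''.join(c for prev, c in zip('x' + s, s) if not (c == '.' and prev == '.'))
--     s = s.strip('.')
--     if not s: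
--         return 'aaa'
--     s = s[:15]
--     if s[-1] == '.':
--         s = s[:-1]
--     return s if len(s) >= 3 else s + s[-1] * (3 - len(s))
-- ===== Notes on version B (the rewrite author's own statement) =====
-- stated objective: simpler
-- what changed: A builds the id in one fused stateful loop (dot counter, list appends) followed by try/except pops and an in-place pad loop; B is a staged string pipeline: filter comprehension, a zip-with-previous comprehension that collapses consecutive dots, a both-ends dot strip, slicing, and arithmetic padding.
import Mathlib
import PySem

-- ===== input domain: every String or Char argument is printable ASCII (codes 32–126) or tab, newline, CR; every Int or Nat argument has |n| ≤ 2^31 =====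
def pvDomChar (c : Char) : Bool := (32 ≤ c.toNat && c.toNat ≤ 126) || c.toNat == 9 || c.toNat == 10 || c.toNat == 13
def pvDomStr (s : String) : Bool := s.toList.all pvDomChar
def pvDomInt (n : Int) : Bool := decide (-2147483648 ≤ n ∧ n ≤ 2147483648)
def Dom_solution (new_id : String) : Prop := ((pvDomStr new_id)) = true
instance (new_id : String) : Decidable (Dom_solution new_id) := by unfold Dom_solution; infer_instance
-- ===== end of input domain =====

-- B replaces A's fused stateful accumulation loop (+ try/except pops) by a staged pipeline:
-- filter, collapse consecutive dots by comparing each char with its predecessor (zip), strip dots, slice, pad.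

-- ===== PORT A =====
def solutionStep (st : List Char × Int) (i : Char) : List Char × Int :=
  if PySem.Chars.isdigit i || PySem.Chars.isalpha i || ['-', '_'].contains i then
    (st.1 ++ [i], 0)
  else if i == '.' then
    ((if st.2 == 0 then st.1 ++ [i] else st.1), st.2 + 1)
  else
    st

-- the 'for _ in range(n): temp.append(temp[-1])' loop; the none branch is Python's
-- IndexError on an empty list (unreachable here), kept only to make the fold total
def solutionPad (t : List Char) (n : Int) : List Char :=
  (PySem.List.pyRange 0 n 1).foldl
    (fun acc _ =>
      match PySem.List.pyGet? acc (-1) with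
      | some c => acc ++ [c]
      | none => acc) t

def solution (new_id : String) : String :=
  let s := PySem.Chars.lower new_id.toList
  let temp := (s.foldl solutionStep ([], 0)).1
  match PySem.List.pyGet? temp 0 with
  | none => "aaa"   -- IndexError caught by 'except'
  | some c0 =>
    let temp := if c0 == '.' then temp.drop 1 else temp  -- temp.pop(0)
    match PySem.List.pyGet? temp (-1) with
    | none => "aaa" -- IndexError caught by 'except'
    | some cl =>
      let temp := if cl == '.' then temp.dropLast else temp  -- temp.pop()
      if temp.length == 0 then "aaa"
      else
        let temp := if 16 ≤ temp.length then
            let t := PySem.List.slice temp (some 0) (some 15)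
            if PySem.List.pyGet? t (-1) == some '.' then t.dropLast else t
          else temp
        let temp := if temp.length ≤ 2 then solutionPad temp (3 - (temp.length : Int)) else temp
        String.ofList temp

-- ===== PORT B =====
def solutionAltKeep (c : Char) : Bool :=
  PySem.Chars.isdigit c || PySem.Chars.isalpha c || (c == '-' || c == '_' || c == '.')

-- ''.join(c for prev, c in zip('x' + s, s) if not (c == '.' and prev == '.'))
def solutionAltCollapse (s : List Char) : List Char :=
  ((('x' :: s).zip s).filter (fun pc => !(pc.2 == '.' && pc.1 == '.'))).map Prod.snd

def solution_alt (new_id : String) : String :=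
  let s := PySem.Chars.lower new_id.toList
  let s := s.filter solutionAltKeep
  let s := solutionAltCollapse s
  let s := PySem.Chars.stripChars s ['.']
  if s = [] then "aaa"
  else
    let s := PySem.List.slice s none (some 15)
    let s := if PySem.List.pyGet? s (-1) == some '.' then PySem.List.slice s none (some (-1)) else s
    if 3 ≤ s.length then String.ofList s
    else
      match PySem.List.pyGet? s (-1) with
      | some c => String.ofList (s ++ List.replicate (3 - s.length) c)
      | none => String.ofList s  -- Python IndexError; unreachable (s ≠ [] here), kept for totality

-- ===== PRECONDITION & SPEC =====
def Spec_solution (new_id : String) (out : String) : Prop := out = solution_alt new_id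
instance (new_id : String) (out : String) : Decidable (Spec_solution new_id out) := by unfold Spec_solution; infer_instance

-- ===== CLAIM (what is proved, stated in full; the proofs are below) =====
def Claim_equal_solution : Prop := ∀ (new_id : String), Dom_solution new_id → Spec_solution new_id (solution new_id)

-- ===== LEMMAS AND PROOFS =====

-- collapse of consecutive dots, parameterised by "was the previous kept char a dot"
def pvCol : Bool → List Char → List Char
  | _, [] => []
  | b, c :: cs => if c == '.' then (if b then pvCol true cs else c :: pvCol true cs) else c :: pvCol false cs

def pvR (a b : Char) : Prop := a ≠ '.' ∨ b ≠ '.'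

lemma pvCol_cons_dot (b : Bool) (cs : List Char) :
    pvCol b ('.' :: cs) = if b then pvCol true cs else '.' :: pvCol true cs := by
  simp [pvCol]

lemma pvCol_cons_ne (b : Bool) (c : Char) (cs : List Char) (h : (c == '.') = false) :
    pvCol b (c :: cs) = c :: pvCol false cs := by
  simp [pvCol, h]

lemma pvKeep_ne_dot (c : Char) (h : (PySem.Chars.isdigit c || PySem.Chars.isalpha c || ['-', '_'].contains c) = true) :
    (c == '.') = false := by
  by_contra hne
  have hc : c = '.' := by
    have : (c == '.') = true := by simpa using hne
    simpa using this
  subst hc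
  revert h
  decide

lemma pvFold (l : List Char) : ∀ (acc : List Char) (d : Int), 0 ≤ d →
    (l.foldl solutionStep (acc, d)).1 =
      acc ++ pvCol (d != 0) (l.filter (fun c =>
        (PySem.Chars.isdigit c || PySem.Chars.isalpha c || ['-', '_'].contains c) || c == '.')) ∧
    0 ≤ (l.foldl solutionStep (acc, d)).2 := by
  induction l with
  | nil => intro acc d hd; simpa [pvCol] using hd
  | cons c cs ih =>
    intro acc d hd
    by_cases hk : (PySem.Chars.isdigit c || PySem.Chars.isalpha c || ['-', '_'].contains c) = true
    · have hcd := pvKeep_ne_dot c hk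
      have hstep : solutionStep (acc, d) c = (acc ++ [c], 0) := by
        unfold solutionStep; rw [if_pos hk]
      rw [List.foldl_cons, hstep]
      rcases ih (acc ++ [c]) 0 le_rfl with ⟨h1, h2⟩
      refine ⟨?_, h2⟩
      rw [h1, List.filter_cons, if_pos (by rw [hk, Bool.true_or]), pvCol_cons_ne _ _ _ hcd]
      simp
    · by_cases hdot : (c == '.') = true
      · have hc : c = '.' := by simpa using hdot
        subst hc
        have hcond : ((PySem.Chars.isdigit '.' || PySem.Chars.isalpha '.' || ['-', '_'].contains '.') || '.' == '.') = true := by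
          rw [hdot, Bool.or_true]
        by_cases hd0 : d = 0
        · subst hd0
          have hstep : solutionStep (acc, 0) '.' = (acc ++ ['.'], 1) := by
            unfold solutionStep
            rw [if_neg hk, if_pos hdot, if_pos (by rfl)]
            rfl
          rw [List.foldl_cons, hstep]
          rcases ih (acc ++ ['.']) 1 (by omega) with ⟨h1, h2⟩
          refine ⟨?_, h2⟩
          rw [h1, List.filter_cons, if_pos hcond, pvCol_cons_dot,
            show ((0:Int) != 0) = false from rfl, if_neg (by simp),
            show ((1:Int) != 0) = true from rfl]
          simp
        · have hstep : solutionStep (acc, d) '.' = (acc, d + 1) := by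
            unfold solutionStep
            rw [if_neg hk, if_pos hdot, if_neg (by simpa using hd0)]
          rw [List.foldl_cons, hstep]
          rcases ih acc (d + 1) (by omega) with ⟨h1, h2⟩
          refine ⟨?_, h2⟩
          have hb : (d != 0) = true := by simpa using hd0
          have hb1 : (d + 1 != 0) = true := by
            have : d + 1 ≠ 0 := by omega
            simpa using this
          rw [h1, List.filter_cons, if_pos hcond, pvCol_cons_dot, hb, hb1, if_pos rfl]
      · have hkf : (PySem.Chars.isdigit c || PySem.Chars.isalpha c || ['-', '_'].contains c) = false := by
          simpa using hk
        have hdotf : (c == '.') = false := by simpa using hdot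
        have hstep : solutionStep (acc, d) c = (acc, d) := by
          unfold solutionStep
          rw [if_neg hk, if_neg (by simpa using hdot)]
        rw [List.foldl_cons, hstep]
        rcases ih acc d hd with ⟨h1, h2⟩
        refine ⟨?_, h2⟩
        rw [h1, List.filter_cons, if_neg (by rw [hkf, hdotf]; simp)]

lemma pvPred_eq (c : Char) :
    ((PySem.Chars.isdigit c || PySem.Chars.isalpha c || ['-', '_'].contains c) || c == '.') = solutionAltKeep c := by
  simp only [solutionAltKeep, List.contains_cons, List.contains_nil, Bool.or_false,
    Bool.or_assoc]

lemma pvZip (l : List Char) : ∀ p : Char,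
    (((p :: l).zip l).filter (fun pc => !(pc.2 == '.' && pc.1 == '.'))).map Prod.snd = pvCol (p == '.') l := by
  induction l with
  | nil => intro p; simp [pvCol]
  | cons c cs ih =>
    intro p
    rw [List.zip_cons_cons, List.filter_cons]
    by_cases hc : (c == '.') = true
    · by_cases hp : (p == '.') = true
      · rw [if_neg (by simp [hc, hp]), ih c]
        simp [pvCol, hc, hp]
      · rw [if_pos (by simp [hc, hp]), List.map_cons, ih c]
        have hc' : c = '.' := by simpa using hc
        simp [pvCol, hp, hc']
    · rw [if_pos (by simp [hc]), List.map_cons, ih c]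
      simp [pvCol, hc]

lemma pvCol_head (l : List Char) : ∀ y, (pvCol true l).head? = some y → y ≠ '.' := by
  induction l with
  | nil => intro y hy; simp [pvCol] at hy
  | cons c cs ih =>
    intro y hy
    by_cases hc : (c == '.') = true
    · rw [show pvCol true (c :: cs) = pvCol true cs by simp [pvCol, hc]] at hy
      exact ih y hy
    · rw [show pvCol true (c :: cs) = c :: pvCol false cs by simp [pvCol, hc]] at hy
      simp at hy
      subst hy
      simpa using hc

lemma pvCol_chain (l : List Char) : ∀ b, (pvCol b l).IsChain pvR := by
  induction l with
  | nil => intro b; simp [pvCol]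
  | cons c cs ih =>
    intro b
    by_cases hc : (c == '.') = true
    · have hc' : c = '.' := by simpa using hc
      cases b with
      | true => simpa [pvCol, hc] using ih true
      | false =>
        rw [show pvCol false (c :: cs) = c :: pvCol true cs by simp [pvCol, hc]]
        rw [List.isChain_cons]
        exact ⟨fun y hy => Or.inr (pvCol_head cs y (by simpa using hy)), ih true⟩
    · rw [show pvCol b (c :: cs) = c :: pvCol false cs by simp [pvCol, hc]]
      rw [List.isChain_cons]
      exact ⟨fun y _ => Or.inl (by simpa using hc), ih false⟩

lemma pvGet0 (l : List Char) : PySem.List.pyGet? l 0 = l.head? := by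
  cases l with
  | nil => simp [PySem.List.pyGet?, PySem.List.pyIdx?]
  | cons a as =>
    simp [PySem.List.pyGet?, PySem.List.pyIdx?]

lemma pvGetNeg1 (l : List Char) : PySem.List.pyGet? l (-1) = l.getLast? := by
  cases l with
  | nil => simp [PySem.List.pyGet?, PySem.List.pyIdx?]
  | cons a as =>
    have h1 : ¬ ((0:Int) ≤ -1) := by omega
    have h2 : -(((a :: as).length : Int)) ≤ -1 := by
      simp only [List.length_cons]
      push_cast
      omega
    simp only [PySem.List.pyGet?, PySem.List.pyIdx?, if_neg h1, if_pos h2]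
    simp [List.getLast?_eq_getElem?]

lemma pvLstrip (l : List Char) (h : l.IsChain pvR) :
    l.dropWhile (fun c => ['.'].contains c) = if l.head? = some '.' then l.tail else l := by
  cases l with
  | nil => simp
  | cons c cs =>
    rw [List.isChain_cons] at h
    by_cases hc : c = '.'
    · subst hc
      rw [List.dropWhile_cons, if_pos (by simp)]
      cases cs with
      | nil => simp
      | cons d ds =>
        have hd : d ≠ '.' := by
          rcases h.1 d (by simp) with h' | h'
          · exact absurd rfl h'
          · exact h'
        rw [List.dropWhile_cons, if_neg (by simpa using hd)]
        simp
    · rw [List.dropWhile_cons, if_neg (by simpa using hc)]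
      simp [hc]

lemma pvRstrip (l : List Char) (h : l.IsChain pvR) :
    (l.reverse.dropWhile (fun c => ['.'].contains c)).reverse =
      if l.getLast? = some '.' then l.dropLast else l := by
  induction l using List.reverseRecOn with
  | nil => simp
  | append_singleton l c ih =>
    rw [List.isChain_append] at h
    by_cases hc : c = '.'
    · subst hc
      rw [List.reverse_append]
      simp only [List.reverse_cons, List.reverse_nil, List.nil_append, List.singleton_append]
      rw [List.dropWhile_cons, if_pos (by simp)]
      have hstop : List.dropWhile (fun c => ['.'].contains c) l.reverse = l.reverse := by
        cases hrev : l.reverse with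
        | nil => simp
        | cons x xs =>
          have hx : x ≠ '.' := by
            have hxl : l.getLast? = some x := by
              rw [← List.head?_reverse, hrev]; rfl
            rcases h.2.2 x (by rw [hxl]; simp) '.' (by simp) with h' | h'
            · exact h'
            · exact absurd rfl h'
          rw [List.dropWhile_cons, if_neg (by simpa using hx)]
      rw [hstop, List.reverse_reverse]
      rw [if_pos (by simp), List.dropLast_concat]
    · rw [List.reverse_append]
      simp only [List.reverse_cons, List.reverse_nil, List.nil_append, List.singleton_append]
      rw [List.dropWhile_cons, if_neg (by simpa using hc)]
      rw [if_neg (by simp [hc])]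
      simp

lemma pvSlice015 (l : List Char) : PySem.List.slice l (some 0) (some 15) = l.take 15 := by
  have h := PySem.List.slice_natCast l 0 15
  simpa using h

lemma pvSliceNeg1 (l : List Char) : PySem.List.slice l none (some (-1)) = l.dropLast := by
  cases l with
  | nil => simp [PySem.List.slice, PySem.List.clampIdx]
  | cons a as =>
    simp [PySem.List.slice, PySem.List.clampIdx, List.dropLast_eq_take]
    split <;> omega

lemma pvStripLast (l : List Char) :
    ∀ y, ((l.reverse.dropWhile (fun c => ['.'].contains c)).reverse).getLast? = some y → y ≠ '.' := by
  intro y hy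
  rw [List.getLast?_reverse] at hy
  have h := List.head?_dropWhile_not (fun c => ['.'].contains c) l.reverse
  rw [hy] at h
  simpa using h

-- pad agreement for short lists
lemma pvPad (w : List Char) :
    (if w.length ≤ 2 then String.ofList (solutionPad w (3 - (w.length : Int))) else String.ofList w) =
    (if 3 ≤ w.length then String.ofList w
     else
       match PySem.List.pyGet? w (-1) with
       | some c => String.ofList (w ++ List.replicate (3 - w.length) c)
       | none => String.ofList w) := by
  match w with
  | [] => rfl
  | [a] => rfl
  | [a, b] =>
    norm_num [solutionPad, PySem.List.pyRange, PySem.List.pyGet?, PySem.List.pyIdx?,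
      List.range_succ]
  | a :: b :: c :: rest =>
    simp only [List.length_cons]
    rw [if_neg (by omega), if_pos (by omega)]

-- the two tail stages (truncate + pad) agree on any list whose last element is not a dot
lemma pvTail (u : List Char) (hlast : ∀ y, u.getLast? = some y → y ≠ '.') :
    (let t3 := if 16 ≤ u.length then
        let t := PySem.List.slice u (some 0) (some 15)
        if PySem.List.pyGet? t (-1) == some '.' then t.dropLast else t
      else u
     let t4 := if t3.length ≤ 2 then solutionPad t3 (3 - (t3.length : Int)) else t3
     String.ofList t4) =
    (let v := PySem.List.slice u none (some 15)
     let v' := if PySem.List.pyGet? v (-1) == some '.' then PySem.List.slice v none (some (-1)) else v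
     if 3 ≤ v'.length then String.ofList v'
     else
       match PySem.List.pyGet? v' (-1) with
       | some c => String.ofList (v' ++ List.replicate (3 - v'.length) c)
       | none => String.ofList v') := by
  have htake : PySem.List.slice u none (some 15) = u.take 15 := by
    rw [PySem.List.slice_to u (by norm_num)]
    rfl
  by_cases h16 : 16 ≤ u.length
  · simp only [htake, pvSlice015, pvSliceNeg1, if_pos h16]
    rw [apply_ite String.ofList]
    exact pvPad _
  · have htk : u.take 15 = u := List.take_of_length_le (by omega)
    have hget : (PySem.List.pyGet? u (-1) == some '.') = false := by
      rw [pvGetNeg1]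
      cases hu : u.getLast? with
      | none => rfl
      | some y =>
        have hy := hlast y hu
        simp [hy]
    simp only [htake, htk, hget, if_neg h16, Bool.false_eq_true, if_false]
    rw [apply_ite String.ofList]
    exact pvPad u

-- A raised IndexError (empty temp) exactly where B's stripped string is empty
lemma pvPost_none (t1 : List Char) (hg : PySem.List.pyGet? t1 (-1) = none) :
    "aaa" =
    (let st := (t1.reverse.dropWhile (fun c => ['.'].contains c)).reverse
     if st = [] then "aaa"
     else
       let s1 := PySem.List.slice st none (some 15)
       let s2 := if PySem.List.pyGet? s1 (-1) == some '.' then PySem.List.slice s1 none (some (-1)) else s1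
       if 3 ≤ s2.length then String.ofList s2
       else
         match PySem.List.pyGet? s2 (-1) with
         | some c => String.ofList (s2 ++ List.replicate (3 - s2.length) c)
         | none => String.ofList s2) := by
  have ht1 : t1 = [] := by
    rw [pvGetNeg1] at hg
    simpa using hg
  subst ht1
  simp

-- A's trailing-dot pop + checks agree with B's right strip + slices
lemma pvPost_some (t1 : List Char) (cl : Char) (hch : t1.IsChain pvR)
    (hg : PySem.List.pyGet? t1 (-1) = some cl) :
    (let t2 := if cl == '.' then t1.dropLast else t1
     if t2.length == 0 then "aaa"
     else
       let t3 := if 16 ≤ t2.length then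
           let t := PySem.List.slice t2 (some 0) (some 15)
           if PySem.List.pyGet? t (-1) == some '.' then t.dropLast else t
         else t2
       let t4 := if t3.length ≤ 2 then solutionPad t3 (3 - (t3.length : Int)) else t3
       String.ofList t4) =
    (let st := (t1.reverse.dropWhile (fun c => ['.'].contains c)).reverse
     if st = [] then "aaa"
     else
       let s1 := PySem.List.slice st none (some 15)
       let s2 := if PySem.List.pyGet? s1 (-1) == some '.' then PySem.List.slice s1 none (some (-1)) else s1
       if 3 ≤ s2.length then String.ofList s2
       else
         match PySem.List.pyGet? s2 (-1) with
         | some c => String.ofList (s2 ++ List.replicate (3 - s2.length) c)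
         | none => String.ofList s2) := by
  rw [pvGetNeg1] at hg
  have hstrip := pvRstrip t1 hch
  have hlastfact := pvStripLast t1
  rw [hstrip, hg] at hlastfact
  rw [hstrip, hg]
  by_cases hcl : cl = '.'
  · subst hcl
    rw [if_pos (show (('.' : Char) == '.') = true from rfl)]
    rw [if_pos (show (some '.' : Option Char) = some '.' from rfl)]
    rw [if_pos (show (some '.' : Option Char) = some '.' from rfl)] at hlastfact
    by_cases h2 : t1.dropLast = []
    · rw [if_pos (show (t1.dropLast.length == 0) = true from by
          simp only [beq_iff_eq, List.length_eq_zero_iff]; exact h2),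
        if_pos (show t1.dropLast = [] from h2)]
    · rw [if_neg (show ¬ (t1.dropLast.length == 0) = true from by
          simp only [beq_iff_eq, List.length_eq_zero_iff]; exact h2),
        if_neg (show ¬ t1.dropLast = [] from h2)]
      exact pvTail _ hlastfact
  · rw [if_neg (show ¬ ((cl == '.') = true) from by simpa using hcl)]
    rw [if_neg (show ¬ ((some cl : Option Char) = some '.') from by simp [hcl])]
    have hne : t1 ≠ [] := by
      intro h
      rw [h] at hg
      simp at hg
    rw [if_neg (show ¬ ((t1.length == 0) = true) from by
        simp only [beq_iff_eq, List.length_eq_zero_iff]; exact hne),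
      if_neg (show ¬ t1 = [] from hne)]
    refine pvTail t1 ?_
    intro y hy
    rw [hg] at hy
    injection hy with h'
    rw [← h']
    exact hcl

-- dispatch on A's temp[-1] lookup
lemma pvPost_match (t1 : List Char) (hch : t1.IsChain pvR) :
    (match PySem.List.pyGet? t1 (-1) with
     | none => "aaa"
     | some cl =>
       let t2 := if cl == '.' then t1.dropLast else t1
       if t2.length == 0 then "aaa"
       else
         let t3 := if 16 ≤ t2.length then
             let t := PySem.List.slice t2 (some 0) (some 15)
             if PySem.List.pyGet? t (-1) == some '.' then t.dropLast else t
           else t2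
         let t4 := if t3.length ≤ 2 then solutionPad t3 (3 - (t3.length : Int)) else t3
         String.ofList t4) =
    (let st := (t1.reverse.dropWhile (fun c => ['.'].contains c)).reverse
     if st = [] then "aaa"
     else
       let s1 := PySem.List.slice st none (some 15)
       let s2 := if PySem.List.pyGet? s1 (-1) == some '.' then PySem.List.slice s1 none (some (-1)) else s1
       if 3 ≤ s2.length then String.ofList s2
       else
         match PySem.List.pyGet? s2 (-1) with
         | some c => String.ofList (s2 ++ List.replicate (3 - s2.length) c)
         | none => String.ofList s2) := by
  cases hgl : PySem.List.pyGet? t1 (-1) with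
  | none => exact pvPost_none t1 hgl
  | some cl => exact pvPost_some t1 cl hch hgl

-- A's leading-dot pop agrees with B's left strip
lemma pvStage1 (c0 : Char) (rest : List Char) (hch : (c0 :: rest).IsChain pvR) :
    (let t1 := if c0 == '.' then List.drop 1 (c0 :: rest) else c0 :: rest
     match PySem.List.pyGet? t1 (-1) with
     | none => "aaa"
     | some cl =>
       let t2 := if cl == '.' then t1.dropLast else t1
       if t2.length == 0 then "aaa"
       else
         let t3 := if 16 ≤ t2.length then
             let t := PySem.List.slice t2 (some 0) (some 15)
             if PySem.List.pyGet? t (-1) == some '.' then t.dropLast else t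
           else t2
         let t4 := if t3.length ≤ 2 then solutionPad t3 (3 - (t3.length : Int)) else t3
         String.ofList t4) =
    (let st := ((List.dropWhile (fun c => ['.'].contains c) (c0 :: rest)).reverse.dropWhile
        (fun c => ['.'].contains c)).reverse
     if st = [] then "aaa"
     else
       let s1 := PySem.List.slice st none (some 15)
       let s2 := if PySem.List.pyGet? s1 (-1) == some '.' then PySem.List.slice s1 none (some (-1)) else s1
       if 3 ≤ s2.length then String.ofList s2
       else
         match PySem.List.pyGet? s2 (-1) with
         | some c => String.ofList (s2 ++ List.replicate (3 - s2.length) c)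
         | none => String.ofList s2) := by
  rw [pvLstrip _ hch, List.head?_cons]
  by_cases hc0 : c0 = '.'
  · rw [if_pos (show (c0 == '.') = true from by simpa using hc0),
      if_pos (show (some c0 : Option Char) = some '.' from by rw [hc0]),
      List.drop_one, List.tail_cons]
    exact pvPost_match rest (List.isChain_cons.mp hch).2
  · rw [if_neg (show ¬ (c0 == '.') = true from by simpa using hc0),
      if_neg (show ¬ ((some c0 : Option Char) = some '.') from by simp [hc0])]
    exact pvPost_match (c0 :: rest) hch

-- ===== VERDICT (by name: the statement is the Claim_ definition above) =====
theorem solution_spec : Claim_equal_solution := by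
  intro new_id _
  show solution new_id = solution_alt new_id
  have hfold := (pvFold (PySem.Chars.lower new_id.toList) [] 0 le_rfl).1
  rw [List.nil_append, show ((0:Int) != 0) = false from rfl,
    List.filter_congr (fun c _ => pvPred_eq c)] at hfold
  have hcollapse : solutionAltCollapse (List.filter solutionAltKeep (PySem.Chars.lower new_id.toList)) =
      pvCol false (List.filter solutionAltKeep (PySem.Chars.lower new_id.toList)) := by
    unfold solutionAltCollapse
    rw [pvZip]
    rfl
  have hch : (pvCol false (List.filter solutionAltKeep (PySem.Chars.lower new_id.toList))).IsChain pvR :=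
    pvCol_chain _ false
  unfold solution solution_alt
  simp only [hfold, hcollapse, PySem.Chars.stripChars]
  generalize hgen : pvCol false (List.filter solutionAltKeep (PySem.Chars.lower new_id.toList)) = t at hch ⊢
  cases hh : PySem.List.pyGet? t 0 with
  | none =>
    have ht : t = [] := by
      rw [pvGet0] at hh
      simpa using hh
    subst ht
    simp
  | some c0 =>
    obtain ⟨rest, ht⟩ : ∃ rest, t = c0 :: rest := by
      rw [pvGet0] at hh
      cases t with
      | nil => simp at hh
      | cons a as =>
        rw [List.head?_cons] at hh
        injection hh with h'
        exact ⟨as, by rw [h']⟩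
    subst ht
    exact pvStage1 c0 rest hch
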